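-- pv_equiv track=rewrite | github.com/nbaggett/school_projects | python/calcudoku/solverFuncs.py | check_columns_valid
-- ===== SOURCE A (Python) =====
-- def check_columns_valid(puzzle):
--    isFalse = 0
--    x = 0
--    while x < 5:
--       one = 0
--       two = 0
--       three = 0
--       four = 0
--       five = 0
--       column = ([i[x] for i in puzzle])
--       for val in column:
--          if val == 1:
--             one += 1
--          if val == 2:
--             two += 1
--          if val == 3:
--             three += 1
--          if val == 4:
--             four += 1
--          if val == 5:
--             five += 1
--       x += 1
--       if (one > 1 or two > 1 or three > 1 or four > 1 or five > 1):
--          isFalse += 1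
--          break
--    if isFalse > 0:
--       return False
--    elif isFalse == 0:
--       return True
-- ===== SOURCE B (Python) =====
-- def check_columns_valid(puzzle):
--     for x in range(5):
--         column = [row[x] for row in puzzle]
--         cells = [v for v in column if v in (1, 2, 3, 4, 5)]
--         if len(cells) != len(set(cells)):
--             return False
--     return True
-- ===== Notes on version B (the rewrite author's own statement) =====
-- stated objective: simpler
-- what changed: Replaces A's five hand-kept counters, per-counter >1 tests and break/flag plumbing with set-based duplicate detection per column (len(cells) != len(set(cells))).
import Mathlib
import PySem

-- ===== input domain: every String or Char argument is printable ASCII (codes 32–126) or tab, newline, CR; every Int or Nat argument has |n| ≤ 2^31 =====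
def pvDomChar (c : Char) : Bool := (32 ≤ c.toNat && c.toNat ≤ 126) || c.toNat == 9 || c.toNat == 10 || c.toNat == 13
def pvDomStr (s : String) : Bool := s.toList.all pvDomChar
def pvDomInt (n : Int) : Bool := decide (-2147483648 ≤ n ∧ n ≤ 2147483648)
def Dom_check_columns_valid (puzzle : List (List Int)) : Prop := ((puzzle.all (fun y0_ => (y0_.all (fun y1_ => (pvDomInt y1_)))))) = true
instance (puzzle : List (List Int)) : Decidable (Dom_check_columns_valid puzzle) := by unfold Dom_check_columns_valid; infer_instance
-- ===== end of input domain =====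

-- B replaces A's five hand-kept counters and break/flag plumbing with per-column
-- set-based duplicate detection (len(cells) != len(set(cells))); same cost, simpler.


-- ===== PORT A =====
-- A's inner for-loop over a column: five counters, five independent ifs
def pvCountA (column : List Int) : Int × Int × Int × Int × Int :=
  column.foldl (fun acc val =>
    (if val = 1 then acc.1 + 1 else acc.1,
     if val = 2 then acc.2.1 + 1 else acc.2.1,
     if val = 3 then acc.2.2.1 + 1 else acc.2.2.1,
     if val = 4 then acc.2.2.2.1 + 1 else acc.2.2.2.1,
     if val = 5 then acc.2.2.2.2 + 1 else acc.2.2.2.2)) (0, 0, 0, 0, 0)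

-- A's while-loop over x = 0..4: iterate the remaining indices; the break-with-flag
-- returns isFalse = 1 (i[x] ported as pyGetD i x 0; outside Pre_ Python raises IndexError).
def pvLoopA (puzzle : List (List Int)) : List Int → Int
  | [] => 0
  | x :: rest =>
    let column := puzzle.map (fun i => PySem.List.pyGetD i x 0)
    let c := pvCountA column
    if c.1 > 1 ∨ c.2.1 > 1 ∨ c.2.2.1 > 1 ∨ c.2.2.2.1 > 1 ∨ c.2.2.2.2 > 1 then 1
    else pvLoopA puzzle rest

def check_columns_valid (puzzle : List (List Int)) : Bool :=
  let isFalse := pvLoopA puzzle (PySem.List.pyRange 0 5 1)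
  if isFalse > 0 then false else true

-- ===== PORT B =====
-- one column of B: the cells with values in {1,..,5} contain no duplicate
def pvColOkB (puzzle : List (List Int)) (x : Int) : Bool :=
  let column := puzzle.map (fun row => PySem.List.pyGetD row x 0)
  let cells := column.filter (fun v => v == 1 || v == 2 || v == 3 || v == 4 || v == 5)
  cells.length == (PySem.Set.ofList cells).length

-- B's for-loop with early 'return False' = every column passes
def check_columns_valid_alt (puzzle : List (List Int)) : Bool :=
  (PySem.List.pyRange 0 5 1).all (pvColOkB puzzle)

-- ===== PRECONDITION & SPEC =====
-- Pre_ excludes exactly the grids on which Python's i[x] raises IndexError: some row is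
-- shorter than 5 and no column that every row does reach contains a duplicate value of
-- 1..5 (A and B break out with False at such a duplicate column before indexing fails).
def Pre_check_columns_valid (puzzle : List (List Int)) : Prop :=
  (∀ row ∈ puzzle, 5 ≤ row.length) ∨
  (∃ x ∈ [0, 1, 2, 3, 4], (∀ row ∈ puzzle, (x : Nat) < row.length) ∧
    ∃ v ∈ ([1, 2, 3, 4, 5] : List Int), 2 ≤ (puzzle.map (fun row => row.getD x 0)).count v)
instance (puzzle : List (List Int)) : Decidable (Pre_check_columns_valid puzzle) := by unfold Pre_check_columns_valid; infer_instance
def pvWitness_check_columns_valid : List (List Int) :=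
  [[1, 2, 3, 4, 5], [2, 3, 4, 5, 1], [3, 4, 5, 1, 2], [4, 5, 1, 2, 3], [5, 1, 2, 3, 4]]
def Spec_check_columns_valid (puzzle : List (List Int)) (out : Bool) : Prop := out = check_columns_valid_alt puzzle
instance (puzzle : List (List Int)) (out : Bool) : Decidable (Spec_check_columns_valid puzzle out) := by unfold Spec_check_columns_valid; infer_instance

-- ===== CLAIM (what is proved, stated in full; the proofs are below) =====
def Claim_equal_check_columns_valid : Prop := ∀ (puzzle : List (List Int)), Dom_check_columns_valid puzzle → Pre_check_columns_valid puzzle → Spec_check_columns_valid puzzle (check_columns_valid puzzle)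

-- ===== LEMMAS AND PROOFS =====

-- A's five counters are the counts of 1..5 in the column
theorem pvCountA_go (col : List Int) (a b c d e : Int) :
    col.foldl (fun acc val =>
      (if val = 1 then acc.1 + 1 else acc.1,
       if val = 2 then acc.2.1 + 1 else acc.2.1,
       if val = 3 then acc.2.2.1 + 1 else acc.2.2.1,
       if val = 4 then acc.2.2.2.1 + 1 else acc.2.2.2.1,
       if val = 5 then acc.2.2.2.2 + 1 else acc.2.2.2.2)) (a, b, c, d, e)
    = (a + col.count 1, b + col.count 2, c + col.count 3, d + col.count 4, e + col.count 5) := by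
  induction col generalizing a b c d e with
  | nil => simp
  | cons v t ih =>
    rw [List.foldl_cons, ih]
    simp only [List.count_cons, Prod.mk.injEq, beq_iff_eq]
    refine ⟨?_, ?_, ?_, ?_, ?_⟩ <;> (push_cast; split_ifs <;> omega)

theorem pvCountA_eq (col : List Int) :
    pvCountA col = ((col.count 1 : Int), (col.count 2 : Int), (col.count 3 : Int),
      (col.count 4 : Int), (col.count 5 : Int)) := by
  unfold pvCountA
  rw [pvCountA_go]
  simp

-- len(xs) == len(set(xs)) exactly when xs has no duplicate
theorem setLen_eq_iff (xs : List Int) :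
    (xs.length = (PySem.Set.ofList xs).length) ↔ xs.Nodup := by
  induction xs with
  | nil => simp [PySem.Set.ofList]
  | cons x t ih =>
    rw [PySem.Set.ofList_cons]
    by_cases hx : x ∈ t
    · have hmem : x ∈ PySem.Set.ofList t := (PySem.Set.mem_ofList t x).mpr hx
      have hlt : ((PySem.Set.ofList t).discard x).length < (PySem.Set.ofList t).length := by
        simp only [PySem.Set.discard]
        rw [List.length_filter_lt_length_iff_exists]
        exact ⟨x, hmem, by simp⟩
      have hle := PySem.Set.length_ofList_le (xs := t)
      simp only [List.length_cons, List.nodup_cons]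
      constructor
      · intro h; exact absurd h (by omega)
      · intro h; exact absurd hx h.1
    · have hd : (PySem.Set.ofList t).discard x = PySem.Set.ofList t := by
        simp only [PySem.Set.discard]
        apply List.filter_eq_self.mpr
        intro y hy
        have hyt : y ∈ t := (PySem.Set.mem_ofList t y).mp hy
        simp only [Bool.not_eq_eq_eq_not, Bool.not_true, beq_eq_false_iff_ne, ne_eq]
        rintro rfl; exact hx hyt
      rw [hd]
      simp only [List.length_cons, List.nodup_cons]
      rw [← ih]
      constructor
      · intro h; exact ⟨hx, by omega⟩
      · intro h; omega

-- the filtered column is duplicate-free iff each of 1..5 occurs at most once in the column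
theorem nodup_cells_iff (col : List Int) :
    (col.filter (fun v => v == 1 || v == 2 || v == 3 || v == 4 || v == 5)).Nodup ↔
      (col.count 1 ≤ 1 ∧ col.count 2 ≤ 1 ∧ col.count 3 ≤ 1 ∧ col.count 4 ≤ 1 ∧ col.count 5 ≤ 1) := by
  rw [List.nodup_iff_count_le_one]
  constructor
  · intro h
    refine ⟨?_, ?_, ?_, ?_, ?_⟩
    · rw [← List.count_filter (p := fun v => v == 1 || v == 2 || v == 3 || v == 4 || v == 5)
        (a := (1 : Int)) (l := col) (by decide)]; exact h 1
    · rw [← List.count_filter (p := fun v => v == 1 || v == 2 || v == 3 || v == 4 || v == 5)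
        (a := (2 : Int)) (l := col) (by decide)]; exact h 2
    · rw [← List.count_filter (p := fun v => v == 1 || v == 2 || v == 3 || v == 4 || v == 5)
        (a := (3 : Int)) (l := col) (by decide)]; exact h 3
    · rw [← List.count_filter (p := fun v => v == 1 || v == 2 || v == 3 || v == 4 || v == 5)
        (a := (4 : Int)) (l := col) (by decide)]; exact h 4
    · rw [← List.count_filter (p := fun v => v == 1 || v == 2 || v == 3 || v == 4 || v == 5)
        (a := (5 : Int)) (l := col) (by decide)]; exact h 5
  · rintro ⟨h1, h2, h3, h4, h5⟩ a
    by_cases hp : (a == 1 || a == 2 || a == 3 || a == 4 || a == 5) = true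
    · rw [List.count_filter (p := fun v => v == 1 || v == 2 || v == 3 || v == 4 || v == 5) hp]
      have : a = 1 ∨ a = 2 ∨ a = 3 ∨ a = 4 ∨ a = 5 := by
        simp only [Bool.or_eq_true, beq_iff_eq] at hp; tauto
      rcases this with rfl | rfl | rfl | rfl | rfl <;> assumption
    · have hnm : a ∉ col.filter (fun v => v == 1 || v == 2 || v == 3 || v == 4 || v == 5) := by
        intro hmem
        exact hp (List.of_mem_filter (p := fun v => v == 1 || v == 2 || v == 3 || v == 4 || v == 5) hmem)
      simp [List.count_eq_zero.mpr hnm]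

-- A's break condition on a column x is the negation of B's per-column check
theorem colOk_iff (puzzle : List (List Int)) (x : Int) :
    pvColOkB puzzle x = true ↔
      ¬ ((pvCountA (puzzle.map (fun i => PySem.List.pyGetD i x 0))).1 > 1 ∨
         (pvCountA (puzzle.map (fun i => PySem.List.pyGetD i x 0))).2.1 > 1 ∨
         (pvCountA (puzzle.map (fun i => PySem.List.pyGetD i x 0))).2.2.1 > 1 ∨
         (pvCountA (puzzle.map (fun i => PySem.List.pyGetD i x 0))).2.2.2.1 > 1 ∨
         (pvCountA (puzzle.map (fun i => PySem.List.pyGetD i x 0))).2.2.2.2 > 1) := by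
  simp only [pvColOkB, pvCountA_eq, beq_iff_eq]
  rw [setLen_eq_iff, nodup_cells_iff]
  constructor
  · rintro ⟨h1, h2, h3, h4, h5⟩
    push Not
    refine ⟨?_, ?_, ?_, ?_, ?_⟩ <;> omega
  · intro h
    push Not at h
    obtain ⟨h1, h2, h3, h4, h5⟩ := h
    refine ⟨?_, ?_, ?_, ?_, ?_⟩ <;> omega

-- A's flag-and-break loop computes the conjunction of B's per-column checks
theorem loop_all (puzzle : List (List Int)) (xs : List Int) :
    (if pvLoopA puzzle xs > 0 then false else true) = xs.all (pvColOkB puzzle) := by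
  induction xs with
  | nil => simp [pvLoopA]
  | cons x rest ih =>
    simp only [pvLoopA, List.all_cons]
    by_cases h : ((pvCountA (puzzle.map (fun i => PySem.List.pyGetD i x 0))).1 > 1 ∨
         (pvCountA (puzzle.map (fun i => PySem.List.pyGetD i x 0))).2.1 > 1 ∨
         (pvCountA (puzzle.map (fun i => PySem.List.pyGetD i x 0))).2.2.1 > 1 ∨
         (pvCountA (puzzle.map (fun i => PySem.List.pyGetD i x 0))).2.2.2.1 > 1 ∨
         (pvCountA (puzzle.map (fun i => PySem.List.pyGetD i x 0))).2.2.2.2 > 1)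
    · have hok : pvColOkB puzzle x = false := by
        rw [Bool.eq_false_iff]
        intro hc
        exact (colOk_iff puzzle x).mp hc h
      simp [h, hok]
    · have hok : pvColOkB puzzle x = true := (colOk_iff puzzle x).mpr h
      simp [h, hok, ih]

-- ===== VERDICT (by name: the statement is the Claim_ definition above) =====
theorem check_columns_valid_spec : Claim_equal_check_columns_valid := by
  intro puzzle _ _
  unfold Spec_check_columns_valid check_columns_valid check_columns_valid_alt
  exact loop_all puzzle (PySem.List.pyRange 0 5 1)
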